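-- pv_equiv track=rewrite | github.com/TejaswiniSruthi/Code_Chef | easy_pronounciation.py | tough
-- ===== SOURCE A (Python) =====
-- def tough(n,s):
--     count=0
--     for i in s:
--         if i in val:
--             count=0
--         else:
--             count+=1
--         if(count==4):
--             return False
--     else:
--         return True
--
-- val={'a','e','i','o','u'}
-- ===== SOURCE B (Python) =====
-- def tough(n, s):
--     V = set("aeiou")
--     return not any(a not in V and b not in V and c not in V and d not in V
--                    for a, b, c, d in zip(s, s[1:], s[2:], s[3:]))
-- ===== Notes on version B (the rewrite author's own statement) =====
-- stated objective: idiomatic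
-- what changed: Replaces the stateful consonant counter that resets on vowels with a declarative sliding-window test: zip the string with its three shifted tails and ask whether any 4-char window is vowel-free.
import Mathlib
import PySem

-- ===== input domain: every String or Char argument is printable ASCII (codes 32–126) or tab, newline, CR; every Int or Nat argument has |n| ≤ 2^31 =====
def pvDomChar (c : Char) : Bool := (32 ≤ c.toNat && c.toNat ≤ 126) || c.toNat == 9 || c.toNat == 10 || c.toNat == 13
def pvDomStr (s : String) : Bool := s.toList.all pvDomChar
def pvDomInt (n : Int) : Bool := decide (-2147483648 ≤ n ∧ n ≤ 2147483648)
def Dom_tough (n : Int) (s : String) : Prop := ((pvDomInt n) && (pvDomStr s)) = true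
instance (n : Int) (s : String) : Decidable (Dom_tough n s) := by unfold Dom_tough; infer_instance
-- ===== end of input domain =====

-- B replaces A's stateful consonant counter with an idiomatic sliding-window any() over
-- zip(s, s[1:], s[2:], s[3:]); same O(n) cost, declarative instead of stateful.


-- ===== PORT A =====
-- val = {'a','e','i','o','u'}
def valA : PySem.Set Char := PySem.Set.ofList ['a', 'e', 'i', 'o', 'u']

-- the for-loop over the characters with the resetting counter; early `return False` on count==4
def toughGo : List Char → Int → Bool
  | [], _ => true
  | i :: rest, count =>
    let count := if PySem.Set.contains valA i then 0 else count + 1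
    if count == 4 then false else toughGo rest count

def tough (n : Int) (s : String) : Bool := toughGo s.toList 0

-- ===== PORT B =====
def valB : PySem.Set Char := PySem.Set.ofList "aeiou".toList

def nvB (c : Char) : Bool := !(PySem.Set.contains valB c)

-- any(... for a,b,c,d in zip(s, s[1:], s[2:], s[3:]));  s[k:] with k ≥ 0 is List.drop k (exact)
def anyWindow4 (l : List Char) : Bool :=
  ((l.zip (l.drop 1)).zip ((l.drop 2).zip (l.drop 3))).any
    (fun q => nvB q.1.1 && nvB q.1.2 && nvB q.2.1 && nvB q.2.2)

def tough_alt (n : Int) (s : String) : Bool := !(anyWindow4 s.toList)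

-- ===== PRECONDITION & SPEC =====
def Spec_tough (n : Int) (s : String) (out : Bool) : Prop := out = tough_alt n s
instance (n : Int) (s : String) (out : Bool) : Decidable (Spec_tough n s out) := by unfold Spec_tough; infer_instance

-- ===== CLAIM (what is proved, stated in full; the proofs are below) =====
def Claim_equal_tough : Prop := ∀ (n : Int) (s : String), Dom_tough n s → Spec_tough n s (tough n s)

-- ===== LEMMAS AND PROOFS =====

-- lead l k : the first k characters exist and are all non-vowels
def lead : List Char → Nat → Bool
  | _, 0 => true
  | [], _ + 1 => false
  | c :: rest, k + 1 => nvB c && lead rest k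

lemma lead_mono {l : List Char} {j k : Nat} (hjk : j ≤ k) (h : lead l k = true) :
    lead l j = true := by
  induction l generalizing j k with
  | nil =>
    cases j with
    | zero => rfl
    | succ j => cases k with
      | zero => omega
      | succ k => simp [lead] at h
  | cons c rest ih =>
    cases j with
    | zero => rfl
    | succ j =>
      cases k with
      | zero => omega
      | succ k =>
        simp [lead] at h ⊢
        exact ⟨h.1, ih (by omega) h.2⟩

lemma anyWindow4_cons (a : Char) (rest : List Char) :
    anyWindow4 (a :: rest) = ((nvB a && lead rest 3) || anyWindow4 rest) := by
  match rest with
  | [] => simp [anyWindow4, lead]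
  | [b] => simp [anyWindow4, lead]
  | [b, c] => simp [anyWindow4, lead]
  | b :: c :: d :: t =>
    simp [anyWindow4, lead, List.zip, List.zipWith, Bool.and_assoc]

lemma lead_four_imp (l : List Char) (h : lead l 4 = true) : anyWindow4 l = true := by
  match l with
  | [] => simp [lead] at h
  | [a] => simp [lead] at h
  | [a, b] => simp [lead] at h
  | [a, b, c] => simp [lead] at h
  | a :: b :: c :: d :: t =>
    simp [lead] at h
    simp [anyWindow4_cons, lead, h]

lemma toughGo_eq (l : List Char) (count : Nat) (hc : count ≤ 3) :
    toughGo l (count : Int) = !(anyWindow4 l || lead l (4 - count)) := by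
  induction l generalizing count with
  | nil =>
    have h4 : 4 - count = (3 - count) + 1 := by omega
    simp [toughGo, anyWindow4, h4, lead]
  | cons a rest ih =>
    have hBA : valB = valA := by decide
    by_cases hv : a ∈ valA
    · have hnv : nvB a = false := by
        simp [nvB, hBA, hv]
      have h4 : 4 - count = (3 - count) + 1 := by omega
      have : toughGo (a :: rest) (count : Int) = toughGo rest ((0 : Nat) : Int) := by
        simp [toughGo, hv]
      rw [this, ih 0 (by omega)]
      simp only [anyWindow4_cons, hnv, h4, lead, Bool.false_and, Bool.false_or]
      cases hW : anyWindow4 rest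
      · cases hl : lead rest (4 - 0)
        · simp
        · exact absurd (lead_four_imp rest hl) (by simp [hW])
      · simp
    · have hnv : nvB a = true := by
        simp [nvB, hBA, hv]
      have hstep : ((count : Int) + 1) = ((count + 1 : Nat) : Int) := by push_cast; ring
      by_cases h3 : count = 3
      · subst h3
        have : toughGo (a :: rest) ((3 : Nat) : Int) = false := by
          simp [toughGo, hv]
        rw [this]
        have h4 : 4 - 3 = 0 + 1 := by omega
        simp [anyWindow4_cons, hnv, lead]
      · have hlt : count + 1 ≤ 3 := by omega
        have hne : ¬((count : Int) + 1 = 4) := by omega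
        have : toughGo (a :: rest) (count : Int) = toughGo rest ((count : Int) + 1) := by
          simp [toughGo, hv, hne]
        rw [this, hstep, ih (count + 1) hlt]
        have h4 : 4 - count = (3 - count) + 1 := by omega
        have h4' : 4 - (count + 1) = 3 - count := by omega
        simp only [anyWindow4_cons, hnv, h4, lead, Bool.true_and, h4']
        cases hl3 : lead rest 3
        · simp
        · have : lead rest (3 - count) = true := lead_mono (by omega) hl3
          simp [this]

-- ===== VERDICT (by name: the statement is the Claim_ definition above) =====
theorem tough_spec : Claim_equal_tough := by
  intro n s _
  unfold Spec_tough tough tough_alt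
  have h := toughGo_eq s.toList 0 (by omega)
  simp only [Nat.cast_zero] at h
  rw [h]
  cases hW : anyWindow4 s.toList
  · cases hl : lead s.toList (4 - 0)
    · simp
    · exact absurd (lead_four_imp _ hl) (by simp [hW])
  · simp
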